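-- pv_equiv track=rewrite | github.com/BenVardy/advent-of-code-2021 | day12.py | canpass
-- ===== SOURCE A (Python) =====
-- import itertools
-- from typing import Dict, List
--
-- def canpass(cave: str, path: List[str]) -> bool:
--     if cave in ['start', 'end']:
--         return bool(1 - path.count(cave))
--
--     if cave.islower():
--         if cave not in path:
--             return True
--
--         times_passed = {c: len(list(x)) for c, x in itertools.groupby(sorted(path)) if c.islower()}
--
--         return max(times_passed.values()) == 1
--     else:
--         return True
-- ===== SOURCE B (Python) =====
-- def canpass(cave, path):
--     if cave in ('start', 'end'):
--         return path.count(cave) != 1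
--     if not cave.islower():
--         return True
--     if cave not in path:
--         return True
--     seen = set()
--     for c in path:
--         if c.islower():
--             if c in seen:
--                 return False
--             seen.add(c)
--     return True
-- ===== Notes on version B (the rewrite author's own statement) =====
-- stated objective: simpler
-- what changed: Replaces the sort + itertools.groupby + dict-comprehension + max aggregation with a single early-exit pass over path that tracks already-seen lowercase caves in a set (the start/end branch becomes the equivalent count != 1).
import Mathlib
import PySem

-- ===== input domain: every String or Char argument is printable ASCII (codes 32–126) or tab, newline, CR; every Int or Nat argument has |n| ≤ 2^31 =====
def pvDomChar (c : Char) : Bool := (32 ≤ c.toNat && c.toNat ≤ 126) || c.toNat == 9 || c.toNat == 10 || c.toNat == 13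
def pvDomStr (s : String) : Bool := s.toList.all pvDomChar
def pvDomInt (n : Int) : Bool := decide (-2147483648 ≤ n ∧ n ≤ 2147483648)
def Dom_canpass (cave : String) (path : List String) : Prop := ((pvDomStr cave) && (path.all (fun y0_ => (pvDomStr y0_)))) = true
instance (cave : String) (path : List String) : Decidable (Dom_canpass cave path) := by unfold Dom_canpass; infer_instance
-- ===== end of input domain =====

-- B replaces A's sort + groupby + dict + max aggregation by one early-exit pass over path with a set of lowercase caves already seen.

-- str.islower(): at least one cased character and no uppercase one — exact on the ASCII domain,
-- where the cased characters are exactly a-z and A-Z (used by both Pythons via str.islower).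
def pvStrIslower (s : String) : Bool :=
  s.toList.any PySem.Chars.islower && !(s.toList.any PySem.Chars.isupper)

-- ===== PORT A =====
-- itertools.groupby over a list, each group materialised as its key and its length.
def pvGroupRuns : List String → List (String × Int)
  | [] => []
  | x :: xs =>
      (x, 1 + ((xs.takeWhile (fun y => y == x)).length : Int)) ::
        pvGroupRuns (xs.dropWhile (fun y => y == x))
termination_by l => l.length
decreasing_by
  simp only [List.length_cons]
  have := List.length_dropWhile_le (fun y => y == x) xs
  omega

def canpass (cave : String) (path : List String) : Bool :=
  if cave == "start" || cave == "end" then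
    decide ((1 - (path.count cave : Int)) ≠ 0)
  else if pvStrIslower cave then
    if !(path.contains cave) then
      true
    else
      let times_passed : PySem.Dict String Int :=
        (pvGroupRuns (PySem.List.sorted path (fun x => x) false)).foldl
          (fun d p => if pvStrIslower p.1 then d.insert p.1 p.2 else d) PySem.Dict.empty
      -- max() of the (provably nonempty here) values list; none is unreachable
      PySem.List.max? times_passed.values (fun v => v) == some 1
  else
    true

-- ===== PORT B =====
def canpassLoop : List String → PySem.Set String → Bool
  | [], _ => true
  | c :: rest, seen =>
      if pvStrIslower c then
        if PySem.Set.contains seen c then false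
        else canpassLoop rest (PySem.Set.add seen c)
      else canpassLoop rest seen

def canpass_alt (cave : String) (path : List String) : Bool :=
  if cave == "start" || cave == "end" then
    decide (path.count cave ≠ 1)
  else if !(pvStrIslower cave) then
    true
  else if !(path.contains cave) then
    true
  else
    canpassLoop path PySem.Set.empty

-- ===== PRECONDITION & SPEC =====
def Spec_canpass (cave : String) (path : List String) (out : Bool) : Prop := out = canpass_alt cave path
instance (cave : String) (path : List String) (out : Bool) : Decidable (Spec_canpass cave path out) := by unfold Spec_canpass; infer_instance

-- ===== CLAIM (what is proved, stated in full; the proofs are below) =====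
def Claim_equal_canpass : Prop := ∀ (cave : String) (path : List String), Dom_canpass cave path → Spec_canpass cave path (canpass cave path)

-- ===== LEMMAS AND PROOFS =====

-- every key produced by pvGroupRuns is an element of the list
theorem pvGroupRuns_fst_mem (l : List String) (p : String × Int)
    (hp : p ∈ pvGroupRuns l) : p.1 ∈ l := by
  induction l using pvGroupRuns.induct with
  | case1 => simp [pvGroupRuns] at hp
  | case2 x xs ih =>
    rw [pvGroupRuns] at hp
    rcases List.mem_cons.mp hp with h | h
    · simp [h]
    · exact List.mem_cons_of_mem _ ((xs.dropWhile_sublist (p := fun y => y == x)).mem (ih h))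

-- in a sorted tail whose elements dominate x, everything past the leading x-run is > x
theorem pv_dropWhile_gt (x : String) (xs : List String) (hp : xs.Pairwise (· ≤ ·))
    (hx : ∀ y ∈ xs, x ≤ y) :
    ∀ z ∈ xs.dropWhile (fun y => y == x), x < z := by
  induction xs with
  | nil => simp
  | cons a t ih =>
    rw [List.dropWhile_cons]
    by_cases ha : a = x
    · simp only [ha, beq_self_eq_true, if_true]
      exact ih (List.Pairwise.of_cons hp) (fun y hy => hx y (List.mem_cons_of_mem _ hy))
    · have hxa : x < a :=
        lt_of_le_of_ne (hx a List.mem_cons_self) (fun h => ha h.symm)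
      simp only [beq_iff_eq, ha, if_false]
      intro z hz
      rcases List.mem_cons.mp hz with rfl | hz'
      · exact hxa
      · exact lt_of_lt_of_le hxa ((List.pairwise_cons.mp hp).1 z hz')

-- count of the head of a sorted list = 1 + length of the leading run
theorem pv_count_head_sorted (x : String) (xs : List String)
    (hp : (x :: xs).Pairwise (· ≤ ·)) :
    (x :: xs).count x = 1 + (xs.takeWhile (fun y => y == x)).length := by
  have hx : ∀ y ∈ xs, x ≤ y := (List.pairwise_cons.mp hp).1
  have hd := pv_dropWhile_gt x xs (List.Pairwise.of_cons hp) hx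
  have hsplit : xs.count x
      = (xs.takeWhile (fun y => y == x)).count x + (xs.dropWhile (fun y => y == x)).count x := by
    rw [← List.count_append, List.takeWhile_append_dropWhile]
  have htake : (xs.takeWhile (fun y => y == x)).count x
      = (xs.takeWhile (fun y => y == x)).length :=
    List.count_eq_length.mpr (fun b hb => by
      have h := List.mem_takeWhile_imp hb
      simp only [beq_iff_eq] at h
      exact h.symm)
  have hdrop : (xs.dropWhile (fun y => y == x)).count x = 0 :=
    List.count_eq_zero.mpr (fun hmem => lt_irrefl x (hd x hmem))
  rw [List.count_cons_self, hsplit, htake, hdrop]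
  omega

-- a non-head element's count ignores the head and the leading run
theorem pv_count_tail_sorted (x c : String) (xs : List String)
    (_hp : (x :: xs).Pairwise (· ≤ ·)) (hc : x < c) :
    (x :: xs).count c = (xs.dropWhile (fun y => y == x)).count c := by
  have hxc : c ≠ x := fun h => lt_irrefl x (h ▸ hc)
  have htake : (xs.takeWhile (fun y => y == x)).count c = 0 :=
    List.count_eq_zero.mpr (fun hmem => by
      have h := List.mem_takeWhile_imp hmem
      simp only [beq_iff_eq] at h
      exact hxc h)
  have hsplit : xs.count c
      = (xs.takeWhile (fun y => y == x)).count c + (xs.dropWhile (fun y => y == x)).count c := by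
    rw [← List.count_append, List.takeWhile_append_dropWhile]
  rw [List.count_cons_of_ne (Ne.symm hxc), hsplit, htake]
  omega

-- on a sorted list every produced run length is the count of its key
theorem pvGroupRuns_snd_eq_count (l : List String) (hl : l.Pairwise (· ≤ ·))
    (p : String × Int) (hp : p ∈ pvGroupRuns l) : p.2 = (l.count p.1 : Int) := by
  induction l using pvGroupRuns.induct with
  | case1 => simp [pvGroupRuns] at hp
  | case2 x xs ih =>
    have hx : ∀ y ∈ xs, x ≤ y := (List.pairwise_cons.mp hl).1
    have htail : (xs.dropWhile (fun y => y == x)).Pairwise (· ≤ ·) :=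
      List.Pairwise.sublist (List.dropWhile_sublist _) (List.Pairwise.of_cons hl)
    rw [pvGroupRuns] at hp
    rcases List.mem_cons.mp hp with rfl | h
    · rw [pv_count_head_sorted x xs hl]
      push_cast
      ring
    · have h2 := ih htail h
      have hmem : p.1 ∈ xs.dropWhile (fun y => y == x) := pvGroupRuns_fst_mem _ p h
      have hlt : x < p.1 :=
        pv_dropWhile_gt x xs (List.Pairwise.of_cons hl) hx p.1 hmem
      rw [pv_count_tail_sorted x p.1 xs hl hlt]
      exact h2

-- on a sorted list the keys are strictly increasing (hence distinct)
theorem pvGroupRuns_keys_pairwise (l : List String) (hl : l.Pairwise (· ≤ ·)) :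
    ((pvGroupRuns l).map Prod.fst).Pairwise (· < ·) := by
  induction l using pvGroupRuns.induct with
  | case1 => simp [pvGroupRuns]
  | case2 x xs ih =>
    have hx : ∀ y ∈ xs, x ≤ y := (List.pairwise_cons.mp hl).1
    have htail : (xs.dropWhile (fun y => y == x)).Pairwise (· ≤ ·) :=
      List.Pairwise.sublist (List.dropWhile_sublist _) (List.Pairwise.of_cons hl)
    rw [pvGroupRuns, List.map_cons, List.pairwise_cons]
    refine ⟨?_, ih htail⟩
    intro k hk
    rcases List.mem_map.mp hk with ⟨q, hq, rfl⟩
    exact pv_dropWhile_gt x xs (List.Pairwise.of_cons hl) hx q.1 (pvGroupRuns_fst_mem _ q hq)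

-- every element of the list occurs as a key
theorem pvGroupRuns_mem_fst (l : List String) (c : String) (hc : c ∈ l) :
    ∃ p ∈ pvGroupRuns l, p.1 = c := by
  induction l using pvGroupRuns.induct with
  | case1 => simp at hc
  | case2 x xs ih =>
    rw [pvGroupRuns]
    by_cases hcx : c = x
    · exact ⟨_, List.mem_cons_self, hcx.symm⟩
    · rcases List.mem_cons.mp hc with h | h
      · exact absurd h hcx
      · rcases List.mem_append.mp (by rw [List.takeWhile_append_dropWhile (p := fun y => y == x) (l := xs)]; exact h) with h1 | h2
        · exact absurd (by simpa using List.mem_takeWhile_imp h1) hcx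
        · obtain ⟨q, hq, hq1⟩ := ih h2
          exact ⟨q, List.mem_cons_of_mem _ hq, hq1⟩

-- conditional-insert fold = insert fold over the filtered list
theorem foldl_insert_if (l : List (String × Int)) (d : PySem.Dict String Int) :
    l.foldl (fun d p => if pvStrIslower p.1 then d.insert p.1 p.2 else d) d
      = (l.filter (fun p => pvStrIslower p.1)).foldl (fun d p => d.insert p.1 p.2) d := by
  induction l generalizing d with
  | nil => rfl
  | cons p t ih =>
    by_cases h : pvStrIslower p.1 = true <;> simp [h, ih]

-- B's loop returns true iff the lowercase elements are duplicate-free and unseen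
theorem canpassLoop_iff (path : List String) (seen : PySem.Set String) :
    canpassLoop path seen = true ↔
      ((path.filter (fun c => pvStrIslower c)).Nodup ∧
        ∀ c ∈ path, pvStrIslower c = true → c ∉ seen) := by
  induction path generalizing seen with
  | nil => simp [canpassLoop]
  | cons c rest ih =>
    by_cases hlc : pvStrIslower c = true
    · by_cases hcs : PySem.Set.contains seen c = true
      · have hmem : c ∈ seen := by simpa [PySem.Set.contains] using hcs
        have hstep : canpassLoop (c :: rest) seen = false := by
          show (if pvStrIslower c then
              (if PySem.Set.contains seen c then false
                else canpassLoop rest (PySem.Set.add seen c))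
            else canpassLoop rest seen) = false
          rw [if_pos hlc, if_pos hcs]
        rw [hstep]
        constructor
        · intro h; exact absurd h (by simp)
        · rintro ⟨-, h⟩; exact absurd hmem (h c List.mem_cons_self hlc)
      · have hmem : c ∉ seen := by simpa [PySem.Set.contains] using hcs
        have hstep : canpassLoop (c :: rest) seen = canpassLoop rest (PySem.Set.add seen c) := by
          show (if pvStrIslower c then
              (if PySem.Set.contains seen c then false
                else canpassLoop rest (PySem.Set.add seen c))
            else canpassLoop rest seen) = _
          rw [if_pos hlc, if_neg hcs]
        have hfc : (c :: rest).filter (fun x => pvStrIslower x)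
            = c :: rest.filter (fun x => pvStrIslower x) := by
          simp [hlc]
        rw [hstep, ih, hfc]
        constructor
        · rintro ⟨hnd, hall⟩
          refine ⟨List.nodup_cons.mpr ⟨?_, hnd⟩, ?_⟩
          · intro hc'
            exact (hall c (List.mem_filter.mp hc').1 hlc)
              ((PySem.Set.mem_add seen c c).mpr (Or.inr rfl))
          · intro d hd hld
            rcases List.mem_cons.mp hd with rfl | hd'
            · exact hmem
            · exact fun hds => (hall d hd' hld)
                ((PySem.Set.mem_add seen c d).mpr (Or.inl hds))
        · rintro ⟨hnd, hall⟩
          obtain ⟨hcf, hnd'⟩ := List.nodup_cons.mp hnd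
          refine ⟨hnd', ?_⟩
          intro d hd hld hdadd
          rcases (PySem.Set.mem_add seen c d).mp hdadd with hds | rfl
          · exact (hall d (List.mem_cons_of_mem _ hd) hld) hds
          · exact hcf (List.mem_filter.mpr ⟨hd, hld⟩)
    · have hstep : canpassLoop (c :: rest) seen = canpassLoop rest seen := by
        show (if pvStrIslower c then
            (if PySem.Set.contains seen c then false
              else canpassLoop rest (PySem.Set.add seen c))
          else canpassLoop rest seen) = _
        rw [if_neg hlc]
      have hfc : (c :: rest).filter (fun x => pvStrIslower x)
          = rest.filter (fun x => pvStrIslower x) := by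
        simp [hlc]
      rw [hstep, ih, hfc]
      constructor
      · rintro ⟨hnd, hall⟩
        refine ⟨hnd, ?_⟩
        intro d hd hld
        rcases List.mem_cons.mp hd with rfl | hd'
        · exact absurd hld hlc
        · exact hall d hd' hld
      · rintro ⟨hnd, hall⟩
        exact ⟨hnd, fun d hd hld => hall d (List.mem_cons_of_mem _ hd) hld⟩

-- ===== VERDICT (by name: the statement is the Claim_ definition above) =====
-- duplicate-freedom of the lowercase elements, as a count bound
theorem pv_nodup_filter_iff (path : List String) :
    (path.filter (fun c => pvStrIslower c)).Nodup ↔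
      (∀ c ∈ path, pvStrIslower c = true → path.count c ≤ 1) := by
  constructor
  · intro hnd c hc hlc
    have := List.nodup_iff_count_le_one.mp hnd c
    rwa [List.count_filter hlc] at this
  · intro hq
    refine List.nodup_iff_count_le_one.mpr (fun a => ?_)
    by_cases hla : pvStrIslower a = true
    · rw [List.count_filter hla]
      by_cases ha : a ∈ path
      · exact hq a ha hla
      · rw [List.count_eq_zero.mpr ha]; omega
    · rw [List.count_eq_zero.mpr (fun hmem => hla (List.mem_filter.mp hmem).2)]
      omega

-- A's aggregate equals the duplicate-freedom predicate, in the live branch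
theorem pv_max_eq_one_iff (cave : String) (path : List String)
    (h2 : pvStrIslower cave = true) (h3 : cave ∈ path) :
    ((PySem.List.max?
        (((pvGroupRuns (PySem.List.sorted path (fun x => x) false)).foldl
            (fun d p => if pvStrIslower p.1 then d.insert p.1 p.2 else d)
            PySem.Dict.empty).values)
        (fun v => v)) == some 1) = true ↔
      (∀ c ∈ path, pvStrIslower c = true → path.count c ≤ 1) := by
  set s := PySem.List.sorted path (fun x => x) false with hs_def
  have hperm : s.Perm path := PySem.List.sorted_perm path (fun x => x) false
  have hs : s.Pairwise (· ≤ ·) := PySem.List.sorted_pairwise path (fun x => x)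
  set L := (pvGroupRuns s).filter (fun p => pvStrIslower p.1) with hL_def
  have hd_items :
      (((pvGroupRuns s).foldl
          (fun d p => if pvStrIslower p.1 then d.insert p.1 p.2 else d)
          PySem.Dict.empty)).items = L := by
    rw [foldl_insert_if]
    have hnd : (L.map Prod.fst).Nodup := by
      have hsub : (L.map Prod.fst).Sublist ((pvGroupRuns s).map Prod.fst) :=
        List.Sublist.map Prod.fst List.filter_sublist
      exact hsub.nodup ((pvGroupRuns_keys_pairwise s hs).imp ne_of_lt)
    have := PySem.Dict.items_foldl_insert_fresh L Prod.fst Prod.snd PySem.Dict.empty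
      (fun a _ => PySem.Dict.contains_empty a.1) hnd
    simpa using this
  have hvals :
      (((pvGroupRuns s).foldl
          (fun d p => if pvStrIslower p.1 then d.insert p.1 p.2 else d)
          PySem.Dict.empty)).values = L.map Prod.snd := by
    show (((pvGroupRuns s).foldl
          (fun d p => if pvStrIslower p.1 then d.insert p.1 p.2 else d)
          PySem.Dict.empty)).items.map Prod.snd = _
    rw [hd_items]
  -- the count of any lowercase member of path appears among the values
  have hval_of_mem : ∀ c ∈ path, pvStrIslower c = true →
      ((path.count c : Int)) ∈ L.map Prod.snd := by
    intro c hc hlc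
    obtain ⟨q, hq, hq1⟩ := pvGroupRuns_mem_fst s c (hperm.mem_iff.mpr hc)
    have hq2 : q.2 = (s.count c : Int) := hq1 ▸ pvGroupRuns_snd_eq_count s hs q hq
    have hqL : q ∈ L := List.mem_filter.mpr ⟨hq, by rw [hq1]; exact hlc⟩
    refine List.mem_map.mpr ⟨q, hqL, ?_⟩
    rw [hq2, hperm.count_eq]
  -- every value is the count of some lowercase member of path
  have hmem_val : ∀ v ∈ L.map Prod.snd,
      ∃ c ∈ path, pvStrIslower c = true ∧ v = (path.count c : Int) := by
    intro v hv
    obtain ⟨q, hqL, rfl⟩ := List.mem_map.mp hv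
    obtain ⟨hq, hql⟩ := List.mem_filter.mp hqL
    refine ⟨q.1, hperm.mem_iff.mp (pvGroupRuns_fst_mem s q hq), hql, ?_⟩
    rw [pvGroupRuns_snd_eq_count s hs q hq, hperm.count_eq]
  rw [hvals, beq_iff_eq]
  constructor
  · intro hmax c hc hlc
    have hle := PySem.List.max?_isMax hmax ((path.count c : Int)) (hval_of_mem c hc hlc)
    simp only at hle
    omega
  · intro hq
    have hne : L.map Prod.snd ≠ [] := by
      intro h
      have hv := hval_of_mem cave h3 h2
      rw [h] at hv
      simp at hv
    obtain ⟨m, hm⟩ : ∃ m, PySem.List.max? (L.map Prod.snd) (fun v => v) = some m := by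
      cases hmx : PySem.List.max? (L.map Prod.snd) (fun v => v) with
      | none => exact absurd ((PySem.List.max?_eq_none_iff _ _).mp hmx) hne
      | some m => exact ⟨m, rfl⟩
    obtain ⟨c, hc, hlc, hmc⟩ := hmem_val m (PySem.List.max?_mem hm)
    have hle : path.count c ≤ 1 := hq c hc hlc
    have hge : 1 ≤ path.count c := List.count_pos_iff.mpr hc
    rw [hm, hmc]
    congr 1
    omega

-- ===== VERDICT (by name: the statement is the Claim_ definition above) =====
theorem canpass_spec : Claim_equal_canpass := by
  intro cave path _
  unfold Spec_canpass canpass canpass_alt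
  by_cases h1 : (cave == "start" || cave == "end") = true
  · rw [if_pos h1, if_pos h1]
    exact decide_eq_decide.mpr (by omega)
  · rw [if_neg h1, if_neg h1]
    by_cases h2 : pvStrIslower cave = true
    · have h2' : ¬ ((!pvStrIslower cave) = true) := by simp [h2]
      rw [if_pos h2, if_neg h2']
      by_cases h3 : cave ∈ path
      · have hc' : ¬ ((!path.contains cave) = true) := by simp [h3]
        rw [if_neg hc', if_neg hc']
        rw [Bool.eq_iff_iff, pv_max_eq_one_iff cave path h2 h3,
          canpassLoop_iff path PySem.Set.empty, ← pv_nodup_filter_iff]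
        have hempty : ∀ c : String, c ∉ (PySem.Set.empty : PySem.Set String) :=
          fun c hc => by simp [PySem.Set.empty] at hc
        exact ⟨fun h => ⟨h, fun c _ _ => hempty c⟩, fun h => h.1⟩
      · have hc' : (!path.contains cave) = true := by simp [h3]
        rw [if_pos hc', if_pos hc']
    · have h2' : (!pvStrIslower cave) = true := by simp [h2]
      rw [if_neg h2, if_pos h2']
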